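-- pv_equiv track=rewrite | github.com/philippbogdan/myentropy | antientropy1.py | build_block_labels
-- ===== SOURCE A (Python) =====
-- def build_block_labels(minutes):
--     block_labels = []
--     block_durations = {}
--     block_order = []
--     block_index = -1
--     prev = None
--     for label in minutes:
--         if label != prev:
--             block_index += 1
--             block_name = f"{label}_{block_index}"
--             block_order.append(block_name)
--         block_labels.append(block_name)
--         block_durations[block_name] = block_durations.get(block_name, 0) + 1
--         prev = label
--     return block_labels, block_durations, block_order
-- ===== SOURCE B (Python) =====
-- def build_block_labels(minutes):
--     # Phase 1: detect maximal runs of consecutive equal labels.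
--     runs = []
--     i, n = 0, len(minutes)
--     while i < n:
--         j = i + 1
--         while j < n and minutes[j] == minutes[i]:
--             j += 1
--         runs.append((minutes[i], j - i))
--         i = j
--     # Phase 2: build the three outputs, one run at a time.
--     block_labels = []
--     block_durations = {}
--     block_order = []
--     for k, (label, cnt) in enumerate(runs):
--         name = f"{label}_{k}"
--         block_order.append(name)
--         block_durations[name] = cnt
--         block_labels.extend([name] * cnt)
--     return block_labels, block_durations, block_order
-- ===== Notes on version B (the rewrite author's own statement) =====
-- stated objective: alternative
-- what changed: A builds all three structures in one stateful pass with a running block index, previous label and dict increments; B first computes the list of maximal runs (label, length) with an index scan and then builds the labels, durations and order directly from the enumerated runs, setting each duration once instead of incrementing.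
import Mathlib
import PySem

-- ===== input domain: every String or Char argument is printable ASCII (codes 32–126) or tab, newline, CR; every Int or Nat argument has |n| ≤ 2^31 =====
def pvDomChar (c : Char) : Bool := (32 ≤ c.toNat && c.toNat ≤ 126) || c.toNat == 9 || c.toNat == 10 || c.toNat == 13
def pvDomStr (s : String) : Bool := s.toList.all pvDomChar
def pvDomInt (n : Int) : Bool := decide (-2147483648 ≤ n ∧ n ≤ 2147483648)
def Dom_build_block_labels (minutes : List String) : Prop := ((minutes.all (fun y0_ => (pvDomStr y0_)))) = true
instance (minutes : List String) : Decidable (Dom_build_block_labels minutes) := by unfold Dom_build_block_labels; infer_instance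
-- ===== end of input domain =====

-- B replaces A's single stateful pass (running block index / previous label / dict increments) by a
-- run-length decomposition followed by direct construction from the enumerated runs (objective: alternative).

-- ===== PORT A =====
-- loop body of A's 'for label in minutes'; state = (block_labels, block_durations, block_order, block_index, prev, block_name)
-- (Python's block_name is unassigned before the first iteration, which always assigns it; "" is that never-read initial value)
def pvStepA (st : List String × PySem.Dict String Int × List String × Int × Option String × String)
    (label : String) : List String × PySem.Dict String Int × List String × Int × Option String × String :=
  let (L, D, O, i, p, nm) := st
  let (i', nm', O') :=
    if p ≠ some label then
      (i + 1, label ++ "_" ++ PySem.Int.toStr (i + 1), O ++ [label ++ "_" ++ PySem.Int.toStr (i + 1)])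
    else (i, nm, O)
  (L ++ [nm'], D.insert nm' (D.getD nm' 0 + 1), O', i', some label, nm')

def build_block_labels (minutes : List String) : List String × (List (String × Int)) × List String :=
  let s := minutes.foldl pvStepA ([], PySem.Dict.empty, [], -1, none, "")
  (s.1, s.2.1.items, s.2.2.1)

-- ===== PORT B =====
-- B's phase 1: the outer while loop; each step consumes one maximal run (inner while = takeWhile/dropWhile scan)
def pvRuns : List String → List (String × Int)
  | [] => []
  | x :: xs =>
    (x, 1 + ((xs.takeWhile (fun y => y == x)).length : Int)) :: pvRuns (xs.dropWhile (fun y => y == x))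
termination_by l => l.length
decreasing_by
  exact Nat.lt_succ_of_le (List.length_dropWhile_le _ _)

-- B's phase 2: loop body of 'for k, (label, cnt) in enumerate(runs)'
def pvStepB (st : List String × PySem.Dict String Int × List String)
    (kp : Int × String × Int) : List String × PySem.Dict String Int × List String :=
  let (L, D, O) := st
  let (k, label, cnt) := kp
  let name := label ++ "_" ++ PySem.Int.toStr k
  (L ++ PySem.List.pyRepeat [name] cnt, D.insert name cnt, O ++ [name])

def build_block_labels_alt (minutes : List String) : List String × (List (String × Int)) × List String :=
  let s := (PySem.List.enumerate (pvRuns minutes) 0).foldl pvStepB ([], PySem.Dict.empty, [])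
  (s.1, s.2.1.items, s.2.2)

-- ===== PRECONDITION & SPEC =====
def Spec_build_block_labels (minutes : List String) (out : List String × (List (String × Int)) × List String) : Prop := out = build_block_labels_alt minutes
instance (minutes : List String) (out : List String × (List (String × Int)) × List String) : Decidable (Spec_build_block_labels minutes out) := by unfold Spec_build_block_labels; infer_instance

-- ===== CLAIM (what is proved, stated in full; the proofs are below) =====
def Claim_equal_build_block_labels : Prop := ∀ (minutes : List String), Dom_build_block_labels minutes → Spec_build_block_labels minutes (build_block_labels minutes)

-- ===== LEMMAS AND PROOFS =====

-- my own decimal printer, equal to core's Nat.toDigits 10, convenient for induction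
def pvDigits (n : Nat) : List Char :=
  if _h : n < 10 then [Nat.digitChar n] else pvDigits (n / 10) ++ [Nat.digitChar (n % 10)]
decreasing_by
  exact Nat.div_lt_self (by omega) (by omega)

theorem pvDigits_eq (k : Nat) : pvDigits k
    = if k < 10 then [Nat.digitChar k] else pvDigits (k / 10) ++ [Nat.digitChar (k % 10)] := by
  rw [pvDigits]
  split <;> simp_all

theorem pvToDigitsCore_eq (fuel n : Nat) (l : List Char) (h : n < fuel) :
    Nat.toDigitsCore 10 fuel n l = pvDigits n ++ l := by
  induction fuel generalizing n l with
  | zero => omega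
  | succ f ih =>
    rw [Nat.toDigitsCore]
    by_cases h10 : n / 10 = 0
    · have hn : n < 10 := by omega
      rw [if_pos h10, pvDigits_eq, if_pos hn, Nat.mod_eq_of_lt hn]
      rfl
    · rw [if_neg h10, ih (n / 10) _ (by omega)]
      rw [pvDigits_eq n, if_neg (by omega)]
      simp

theorem pvToDigits_eq (n : Nat) : Nat.toDigits 10 n = pvDigits n := by
  rw [Nat.toDigits, pvToDigitsCore_eq (n + 1) n [] (by omega)]
  simp

theorem pvDigits_ne_nil (n : Nat) : pvDigits n ≠ [] := by
  rw [pvDigits_eq]; split <;> simp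

theorem pvDigitChar_inj (a b : Nat) (ha : a < 10) (hb : b < 10)
    (h : Nat.digitChar a = Nat.digitChar b) : a = b := by
  interval_cases a <;> interval_cases b <;> first | rfl | (exfalso; revert h; decide)

theorem pvDigits_inj (m n : Nat) (h : pvDigits m = pvDigits n) : m = n := by
  induction m using Nat.strong_induction_on generalizing n with
  | _ m ih =>
    rw [pvDigits_eq m, pvDigits_eq n] at h
    by_cases hm : m < 10 <;> by_cases hn : n < 10
    · rw [if_pos hm, if_pos hn] at h
      exact pvDigitChar_inj m n hm hn (by simpa using h)
    · rw [if_pos hm, if_neg hn] at h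
      have hlen := congrArg List.length h
      have hne := pvDigits_ne_nil (n / 10)
      simp at hlen
      exact absurd hlen hne
    · rw [if_neg hm, if_pos hn] at h
      have hlen := congrArg List.length h.symm
      have hne := pvDigits_ne_nil (m / 10)
      simp at hlen
      exact absurd hlen hne
    · rw [if_neg hm, if_neg hn] at h
      have h2 := List.append_inj' h (by simp)
      have hq := ih (m / 10) (Nat.div_lt_self (by omega) (by omega)) (n / 10) h2.1
      have hr := pvDigitChar_inj (m % 10) (n % 10) (by omega) (by omega) (by simpa using h2.2)
      omega

theorem pvDigitChar_ne_underscore (d : Nat) : Nat.digitChar d ≠ '_' := by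
  by_cases h : d < 16
  · interval_cases d <;> decide
  · have hs : Nat.digitChar d = '*' := by
      unfold Nat.digitChar
      repeat rw [if_neg (by omega)]
    rw [hs]; decide

theorem pvDigits_no_underscore (n : Nat) : '_' ∉ pvDigits n := by
  induction n using Nat.strong_induction_on with
  | _ n ih =>
    rw [pvDigits_eq]
    split
    · simpa using (pvDigitChar_ne_underscore n).symm
    · have := ih (n / 10) (Nat.div_lt_self (by omega) (by omega))
      simpa [this] using (pvDigitChar_ne_underscore (n % 10)).symm

-- the suffix after the last '_' is determined: equal strings with '_'-free tails have equal tails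
theorem pvTakeWhile_marker (w z : List Char) (hw : '_' ∉ w) :
    (w ++ '_' :: z).takeWhile (fun c => !(c == '_')) = w := by
  induction w with
  | nil => simp
  | cons c w ih =>
    simp only [List.mem_cons, not_or] at hw
    have hc : (c == '_') = false := by
      simp only [beq_eq_false_iff_ne]
      exact fun hh => hw.1 hh.symm
    simp [hc, ih hw.2]

theorem pvSuffix_inj (a b u v : List Char) (hu : '_' ∉ u) (hv : '_' ∉ v)
    (h : a ++ '_' :: u = b ++ '_' :: v) : u = v := by
  have hrev : u.reverse ++ '_' :: a.reverse = v.reverse ++ '_' :: b.reverse := by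
    have := congrArg List.reverse h
    simpa using this
  have h1 := pvTakeWhile_marker u.reverse a.reverse (by simpa using hu)
  have h2 := pvTakeWhile_marker v.reverse b.reverse (by simpa using hv)
  rw [hrev, h2] at h1
  simpa using (congrArg List.reverse h1).symm

-- distinct block indices give distinct block names
theorem pvName_inj (lab1 lab2 : String) (j k : Int) (hj : 0 ≤ j) (hk : 0 ≤ k)
    (h : lab1 ++ "_" ++ PySem.Int.toStr j = lab2 ++ "_" ++ PySem.Int.toStr k) : j = k := by
  have hl := congrArg String.toList h
  simp only [String.toList_append] at hl
  rw [show ("_" : String).toList = ['_'] from rfl] at hl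
  have hj' : (PySem.Int.toStr j).toList = pvDigits j.toNat := by
    rw [PySem.Int.toList_toStr, PySem.Int.toChars, if_neg (by omega), pvToDigits_eq]
  have hk' : (PySem.Int.toStr k).toList = pvDigits k.toNat := by
    rw [PySem.Int.toList_toStr, PySem.Int.toChars, if_neg (by omega), pvToDigits_eq]
  rw [hj', hk'] at hl
  have := pvSuffix_inj lab1.toList lab2.toList _ _ (pvDigits_no_underscore _) (pvDigits_no_underscore _)
    (by simpa using hl)
  have := pvDigits_inj _ _ this
  omega

-- re-inserting a key with its current value changes nothing (keys unique)
theorem pvInsert_getD_self (D : PySem.Dict String Int) (k : String)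
    (hnd : D.keys.Nodup) (hc : D.contains k = true) : D.insert k (D.getD k 0) = D := by
  apply PySem.Dict.ext
  rw [PySem.Dict.items_insert_of_contains _ _ hc]
  conv_rhs => rw [← List.map_id D.items]
  apply List.map_congr_left
  intro p hp
  by_cases hk : p.1 = k
  · have hg : D.getD p.1 0 = p.2 := PySem.Dict.getD_of_mem_items _ (by simpa using hp) hnd 0
    subst hk
    simp [hg]
  · simp [hk]

-- A's loop over the tail of a run (prev = the run's label): appends nm, increments its count
theorem pvFoldA_same (x nm : String) (cnt : Nat) :
    ∀ (L : List String) (D : PySem.Dict String Int) (O : List String) (i : Int),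
    D.keys.Nodup → D.contains nm = true →
    (List.replicate cnt x).foldl pvStepA (L, D, O, i, some x, nm)
      = (L ++ List.replicate cnt nm, D.insert nm (D.getD nm 0 + cnt), O, i, some x, nm) := by
  induction cnt with
  | zero =>
    intro L D O i hnd hc
    simpa using (pvInsert_getD_self D nm hnd hc).symm
  | succ c ih =>
    intro L D O i hnd hc
    rw [List.replicate_succ, List.foldl_cons]
    have hstep : pvStepA (L, D, O, i, some x, nm) x
        = (L ++ [nm], D.insert nm (D.getD nm 0 + 1), O, i, some x, nm) := by
      simp [pvStepA]
    rw [hstep, ih (L ++ [nm]) (D.insert nm (D.getD nm 0 + 1)) O i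
      (PySem.Dict.nodup_keys_insert _ _ _ hnd) (PySem.Dict.contains_insert_self _ _ _)]
    rw [PySem.Dict.getD_insert_self, PySem.Dict.insert_insert_self]
    have e1 : L ++ [nm] ++ List.replicate c nm = L ++ List.replicate (c + 1) nm := by
      simp [List.replicate_succ]
    have e2 : D.getD nm 0 + 1 + (c : Int) = D.getD nm 0 + ((c + 1 : Nat) : Int) := by
      push_cast; ring
    rw [e1, e2]

-- A's loop over one whole maximal run with a fresh block name
theorem pvFoldA_run (x : String) (cnt : Nat) (L : List String) (D : PySem.Dict String Int)
    (O : List String) (i : Int) (p : Option String) (nm : String)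
    (hp : p ≠ some x) (hnd : D.keys.Nodup)
    (hfresh : D.contains (x ++ "_" ++ PySem.Int.toStr (i + 1)) = false) :
    (x :: List.replicate cnt x).foldl pvStepA (L, D, O, i, p, nm)
      = (L ++ List.replicate (cnt + 1) (x ++ "_" ++ PySem.Int.toStr (i + 1)),
         D.insert (x ++ "_" ++ PySem.Int.toStr (i + 1)) ((cnt : Int) + 1),
         O ++ [x ++ "_" ++ PySem.Int.toStr (i + 1)], i + 1, some x,
         x ++ "_" ++ PySem.Int.toStr (i + 1)) := by
  generalize hg : x ++ "_" ++ PySem.Int.toStr (i + 1) = w at hfresh ⊢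
  rw [List.foldl_cons]
  have hstep : pvStepA (L, D, O, i, p, nm) x
      = (L ++ [w], D.insert w (D.getD w 0 + 1), O ++ [w], i + 1, some x, w) := by
    simp [pvStepA, hp, hg]
  rw [hstep, PySem.Dict.getD_of_not_contains _ _ hfresh]
  rw [pvFoldA_same x w cnt (L ++ [w]) (D.insert w (0 + 1)) (O ++ [w]) (i + 1)
    (PySem.Dict.nodup_keys_insert _ _ _ hnd) (PySem.Dict.contains_insert_self _ _ _)]
  rw [PySem.Dict.getD_insert_self, PySem.Dict.insert_insert_self]
  have e1 : L ++ [w] ++ List.replicate cnt w = L ++ List.replicate (cnt + 1) w := by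
    simp [List.replicate_succ]
  have e2 : (0 : Int) + 1 + (cnt : Int) = (cnt : Int) + 1 := by ring
  rw [e1, e2]

theorem pvDropWhile_head_ne (x : String) (l : List String) (y : String) (t : List String)
    (h : l.dropWhile (fun z => z == x) = y :: t) : y ≠ x := by
  induction l with
  | nil => simp at h
  | cons a l ih =>
    rw [List.dropWhile_cons] at h
    by_cases hax : a = x
    · rw [if_pos (by simp [hax])] at h; exact ih h
    · rw [if_neg (by simp [hax])] at h
      cases h; simpa using hax

theorem pvTakeWhile_replicate (x : String) (l : List String) :
    l.takeWhile (fun z => z == x) = List.replicate (l.takeWhile (fun z => z == x)).length x := by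
  apply List.eq_replicate_of_mem
  intro y hy
  simpa using List.mem_takeWhile_imp hy

-- main invariant: A's fold from a run-boundary state = B's fold over the remaining runs
-- (induction on a length bound N so that the recursive call on the rest of the list is available)
theorem pvMain (N : Nat) :
    ∀ (ms : List String), ms.length ≤ N →
    ∀ (L : List String) (D : PySem.Dict String Int) (O : List String) (i : Int)
      (p : Option String) (nm : String),
    (∀ y t, ms = y :: t → p ≠ some y) →
    D.keys.Nodup →
    (∀ key ∈ D.keys, ∃ (lab : String) (j : Int), 0 ≤ j ∧ j ≤ i ∧ key = lab ++ "_" ++ PySem.Int.toStr j) →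
    (-1 : Int) ≤ i →
    ((ms.foldl pvStepA (L, D, O, i, p, nm)).1
        = ((PySem.List.enumerate (pvRuns ms) (i + 1)).foldl pvStepB (L, D, O)).1 ∧
     (ms.foldl pvStepA (L, D, O, i, p, nm)).2.1
        = ((PySem.List.enumerate (pvRuns ms) (i + 1)).foldl pvStepB (L, D, O)).2.1 ∧
     (ms.foldl pvStepA (L, D, O, i, p, nm)).2.2.1
        = ((PySem.List.enumerate (pvRuns ms) (i + 1)).foldl pvStepB (L, D, O)).2.2) := by
  induction N with
  | zero =>
    intro ms hlen
    have : ms = [] := List.eq_nil_of_length_eq_zero (by omega)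
    subst this
    intro L D O i p nm _ _ _ _
    simp [pvRuns]
  | succ n ih =>
    intro ms hlen L D O i p nm hp hnd hkeys hi
    match ms, hlen, hp with
    | [], _, _ => simp [pvRuns]
    | x :: xs, hlen, hp =>
      set nm' := x ++ "_" ++ PySem.Int.toStr (i + 1) with hnm'
      set t := xs.takeWhile (fun z => z == x) with ht
      set r := xs.dropWhile (fun z => z == x) with hr
      have hsplit : x :: xs = (x :: List.replicate t.length x) ++ r := by
        have h1 : xs = t ++ r := (List.takeWhile_append_dropWhile).symm
        have h2 : t = List.replicate t.length x := pvTakeWhile_replicate x xs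
        calc x :: xs = x :: (t ++ r) := by rw [← h1]
        _ = (x :: List.replicate t.length x) ++ r := by rw [← h2]; simp
      -- freshness of the new block name in D: every key of D carries an index ≤ i < i + 1
      have hfresh : D.contains nm' = false := by
        by_contra hcon
        have hmem : nm' ∈ D.keys := by
          rw [← PySem.Dict.contains_iff_mem_keys]
          revert hcon; cases D.contains nm' <;> simp
        obtain ⟨lab, j, hj0, hji, hkey⟩ := hkeys nm' hmem
        have := pvName_inj lab x j (i + 1) hj0 (by omega) hkey.symm
        omega
      have hrun := pvFoldA_run x t.length L D O i p nm (hp x xs rfl) hnd hfresh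
      have hruns : pvRuns (x :: xs) = (x, 1 + (t.length : Int)) :: pvRuns r := by
        rw [pvRuns]
      -- the recursive call on the rest of the list, from the post-run state
      have hrlen : r.length ≤ n := by
        have h2 : t.length + r.length = xs.length := by
          rw [ht, hr, ← List.length_append, List.takeWhile_append_dropWhile]
        simp only [List.length_cons] at hlen
        omega
      have hrec := ih r hrlen
        (L ++ List.replicate (t.length + 1) nm') (D.insert nm' ((t.length : Int) + 1)) (O ++ [nm'])
        (i + 1) (some x) nm'
        (by intro y ty hy hsome
            have := pvDropWhile_head_ne x xs y ty (by rw [← hr, hy])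
            exact this (by injection hsome with h; exact h.symm))
        (PySem.Dict.nodup_keys_insert _ _ _ hnd)
        (by intro key hkey
            rw [PySem.Dict.keys_insert_of_not_contains _ _ hfresh] at hkey
            rcases List.mem_append.mp hkey with hin | hnew
            · obtain ⟨lab, j, hj0, hji, he⟩ := hkeys key hin
              exact ⟨lab, j, hj0, by omega, he⟩
            · exact ⟨x, i + 1, by omega, le_refl _, by simpa using hnew⟩)
        (by omega)
      have hstepB : List.foldl pvStepB (L, D, O)
            ((i + 1, x, 1 + (t.length : Int)) :: PySem.List.enumerate (pvRuns r) (i + 1 + 1))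
          = List.foldl pvStepB
              (L ++ List.replicate (t.length + 1) nm', D.insert nm' ((t.length : Int) + 1), O ++ [nm'])
              (PySem.List.enumerate (pvRuns r) (i + 1 + 1)) := by
        rw [List.foldl_cons]
        congr 1
        simp only [pvStepB, PySem.List.pyRepeat_singleton, hnm']
        have e1 : (1 + (t.length : Int)).toNat = t.length + 1 := by omega
        have e2 : 1 + (t.length : Int) = (t.length : Int) + 1 := by ring
        rw [e1, e2]
      rw [hruns, PySem.List.enumerate_cons, hstepB]
      rw [hsplit, List.foldl_append, hrun]
      have harith : i + 1 + 1 = i + 2 := by ring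
      simpa [harith] using hrec

-- ===== VERDICT (by name: the statement is the Claim_ definition above) =====
theorem build_block_labels_spec : Claim_equal_build_block_labels := by
  intro minutes _
  unfold Spec_build_block_labels build_block_labels build_block_labels_alt
  have h := pvMain minutes.length minutes (le_refl _) [] PySem.Dict.empty [] (-1) none ""
    (by intro y t _ h; simp at h)
    (PySem.Dict.nodup_keys_empty)
    (by intro key hkey; rw [PySem.Dict.keys_empty] at hkey; simp at hkey)
    (le_refl _)
  rw [show (-1 : Int) + 1 = 0 by ring] at h
  obtain ⟨h1, h2, h3⟩ := h
  simp only [h1, h2, h3]
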